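-- pv_equiv track=rewrite | github.com/c0derMo/advent-of-code | 2025/02/task.py | generate_invalid_v2
-- ===== SOURCE A (Python) =====
-- def generate_invalid_v2(end: int) -> set[int]:
--     result: set[int] = set()
--     i = 1
--     while int(str(i) + str(i)) <= end:
--         repeats = 2
--         while int(repeats * str(i)) <= end:
--             result.add(int(repeats * str(i)))
--             repeats += 1
--         i += 1
--     return result
-- ===== SOURCE B (Python) =====
-- def generate_invalid_v2(end: int) -> set[int]:
--     result: set[int] = set()
--     b, p = 1, 10  # p = the smallest power of ten above b, maintained arithmetically
--     while b * p + b <= end: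
--         n = b * p + b  # the block b written twice
--         while n <= end:
--             result.add(n)
--             n = n * p + b  # append one more copy of the block
--         b += 1
--         if b == p:
--             p *= 10
--     return result
-- ===== Notes on version B (the rewrite author's own statement) =====
-- stated objective: faster
-- what changed: B drops all string work: instead of building str(i) and parsing int(repeats*str(i)) on every iteration, it maintains p, the smallest power of ten above the block b, arithmetically and generates each repetition by the integer recurrence n = n*p + b, enumerating the same (block, repeats) pairs in the same order.
import Mathlib
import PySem

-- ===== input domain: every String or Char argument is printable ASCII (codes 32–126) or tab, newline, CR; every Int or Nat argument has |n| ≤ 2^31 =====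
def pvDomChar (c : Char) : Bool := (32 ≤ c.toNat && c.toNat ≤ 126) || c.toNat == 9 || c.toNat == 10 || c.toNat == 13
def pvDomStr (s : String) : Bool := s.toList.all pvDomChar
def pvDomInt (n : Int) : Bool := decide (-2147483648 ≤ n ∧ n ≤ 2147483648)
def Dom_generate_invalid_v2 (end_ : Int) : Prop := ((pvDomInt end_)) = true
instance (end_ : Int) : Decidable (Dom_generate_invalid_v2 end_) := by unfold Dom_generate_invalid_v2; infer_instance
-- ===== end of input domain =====

-- B replaces the per-iteration string building and re-parsing (int(repeats*str(i))) by a pure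
-- integer recurrence (n = n*p + b, with p the smallest power of ten above the block b, maintained arithmetically); objective: faster (constant factor).

-- ===== PORT A =====
-- `int(s)` is applied by A only to nonempty all-ASCII-digit strings (concatenations of str(i), i ≥ 1);
-- on those, Python's int(s) is exactly this base-10 left fold. It is ported by hand because the
-- recursion body of PySem.Int.ofChars? is private to the prelude, so it cannot be reasoned about
-- symbolically; this fold is exact on every string this program ever parses.
def pvIntOfDigits (cs : List Char) : Int :=
  ((cs.foldl (fun a c => a * 10 + (c.toNat - '0'.toNat)) 0 : Nat) : Int)

-- inner `while int(repeats * str(i)) <= end:` loop of A (fuel only makes the loop total;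
-- the condition is re-checked each step, so semantics are unchanged whenever fuel exceeds the trip count)
def pvInnerA (end_ : Int) (cs : List Char) (repeats : Int) (acc : PySem.Set Int) : Nat → PySem.Set Int
  | 0 => acc
  | fuel + 1 =>
    if pvIntOfDigits (PySem.List.pyRepeat cs repeats) ≤ end_ then
      pvInnerA end_ cs (repeats + 1)
        (PySem.Set.add acc (pvIntOfDigits (PySem.List.pyRepeat cs repeats))) fuel
    else acc

-- outer `while int(str(i) + str(i)) <= end:` loop of A
def pvOuterA (end_ : Int) (i : Int) (acc : PySem.Set Int) : Nat → PySem.Set Int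
  | 0 => acc
  | fuel + 1 =>
    if pvIntOfDigits (PySem.Int.toChars i ++ PySem.Int.toChars i) ≤ end_ then
      pvOuterA end_ (i + 1)
        (pvInnerA end_ (PySem.Int.toChars i) 2 acc (end_.toNat + 2)) fuel
    else acc

def generate_invalid_v2 (end_ : Int) : List Int :=
  pvOuterA end_ 1 PySem.Set.empty (end_.toNat + 2)

-- ===== PORT B =====
-- inner `while n <= end:` loop of B
def pvInnerB (end_ : Int) (b p n : Int) (acc : PySem.Set Int) : Nat → PySem.Set Int
  | 0 => acc
  | fuel + 1 =>
    if n ≤ end_ then pvInnerB end_ b p (n * p + b) (PySem.Set.add acc n) fuel else acc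

-- outer `while b * p + b <= end:` loop of B
def pvOuterB (end_ : Int) (b p : Int) (acc : PySem.Set Int) : Nat → PySem.Set Int
  | 0 => acc
  | fuel + 1 =>
    if b * p + b ≤ end_ then
      pvOuterB end_ (b + 1) (if b + 1 == p then p * 10 else p)
        (pvInnerB end_ b p (b * p + b) acc (end_.toNat + 2)) fuel
    else acc

def generate_invalid_v2_alt (end_ : Int) : List Int :=
  pvOuterB end_ 1 10 PySem.Set.empty (end_.toNat + 2)

-- ===== PRECONDITION & SPEC =====
def Spec_generate_invalid_v2 (end_ : Int) (out : List Int) : Prop := out = generate_invalid_v2_alt end_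
instance (end_ : Int) (out : List Int) : Decidable (Spec_generate_invalid_v2 end_ out) := by unfold Spec_generate_invalid_v2; infer_instance

-- ===== CLAIM (what is proved, stated in full; the proofs are below) =====
def Claim_equal_generate_invalid_v2 : Prop := ∀ (end_ : Int), Dom_generate_invalid_v2 end_ → Spec_generate_invalid_v2 end_ (generate_invalid_v2 end_)

-- ===== LEMMAS AND PROOFS =====

-- clean model of Nat.toDigits 10 (no fuel)
def pvDigitsRec (n : Nat) : List Char :=
  if _h : n < 10 then [Nat.digitChar n]
  else pvDigitsRec (n / 10) ++ [Nat.digitChar (n % 10)]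
decreasing_by exact Nat.div_lt_self (by omega) (by omega)

lemma pvToDigitsCore_eq : ∀ (f n : Nat) (acc : List Char), n < f →
    Nat.toDigitsCore 10 f n acc = pvDigitsRec n ++ acc := by
  intro f
  induction f with
  | zero => intro n acc h; omega
  | succ f ih =>
    intro n acc h
    rw [pvDigitsRec]
    simp only [Nat.toDigitsCore]
    by_cases h10 : n < 10
    · have : n / 10 = 0 := Nat.div_eq_of_lt h10
      simp [this, h10, Nat.mod_eq_of_lt h10]
    · have hne : ¬ n / 10 = 0 := by
        intro hc; exact h10 (by omega)
      have hlt : n / 10 < f := by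
        have := Nat.div_lt_self (n := n) (by omega) (by omega : 1 < 10)
        omega
      simp only [hne, if_false, h10, ih (n / 10) _ hlt]
      simp

lemma pvToChars_eq (i : Int) (h : 0 ≤ i) :
    PySem.Int.toChars i = pvDigitsRec i.toNat := by
  simp only [PySem.Int.toChars, if_neg (by omega : ¬ i < 0), Nat.toDigits]
  simpa using pvToDigitsCore_eq (i.toNat + 1) i.toNat [] (by omega)

-- the Nat value of a digit string under the fold used by pvIntOfDigits
def pvVal (cs : List Char) : Nat := cs.foldl (fun a c => a * 10 + (c.toNat - '0'.toNat)) 0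

lemma pvIntOfDigits_eq (cs : List Char) : pvIntOfDigits cs = (pvVal cs : Int) := rfl

lemma pvFoldl_shift (cs : List Char) : ∀ (a : Nat),
    cs.foldl (fun a c => a * 10 + (c.toNat - '0'.toNat)) a = a * 10 ^ cs.length + pvVal cs := by
  induction cs with
  | nil => intro a; simp [pvVal]
  | cons c cs ih =>
    intro a
    simp only [List.foldl_cons, List.length_cons, pvVal]
    rw [ih (a * 10 + (c.toNat - '0'.toNat)), ih (0 * 10 + (c.toNat - '0'.toNat))]
    ring

lemma pvVal_append (xs ys : List Char) :
    pvVal (xs ++ ys) = pvVal xs * 10 ^ ys.length + pvVal ys := by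
  simp only [pvVal, List.foldl_append]
  exact pvFoldl_shift ys (pvVal xs)

lemma pvDigitChar_val (n : Nat) (h : n < 10) : (Nat.digitChar n).toNat - '0'.toNat = n := by
  interval_cases n <;> decide

lemma pvVal_digitsRec (n : Nat) : pvVal (pvDigitsRec n) = n := by
  induction n using Nat.strong_induction_on with
  | _ n ih =>
    rw [pvDigitsRec]
    by_cases h : n < 10
    · simp only [h, dif_pos, pvVal, List.foldl_cons, List.foldl_nil]
      rw [pvDigitChar_val n h]; omega
    · simp only [h, dif_neg, not_false_iff]
      rw [pvVal_append, ih (n / 10) (Nat.div_lt_self (by omega) (by omega))]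
      have : pvVal [Nat.digitChar (n % 10)] = n % 10 := by
        simp only [pvVal, List.foldl_cons, List.foldl_nil]
        rw [pvDigitChar_val _ (Nat.mod_lt _ (by omega))]; omega
      rw [this]
      simp only [List.length_singleton, pow_one]
      omega

lemma pvDigitsRec_length_pos (n : Nat) : 0 < (pvDigitsRec n).length := by
  rw [pvDigitsRec]
  by_cases h : n < 10 <;> simp [h]

lemma pvDigitsRec_upper (n : Nat) : n < 10 ^ (pvDigitsRec n).length := by
  induction n using Nat.strong_induction_on with
  | _ n ih =>
    rw [pvDigitsRec]
    by_cases h : n < 10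
    · rw [dif_pos h]; simpa using h
    · simp only [h, dif_neg, not_false_iff, List.length_append, List.length_singleton]
      have h1 := ih (n / 10) (Nat.div_lt_self (by omega) (by omega))
      have : n < (n / 10 + 1) * 10 := by omega
      calc n < (n / 10 + 1) * 10 := this
        _ ≤ 10 ^ (pvDigitsRec (n / 10)).length * 10 := by
            have : n / 10 + 1 ≤ 10 ^ (pvDigitsRec (n / 10)).length := h1
            exact Nat.mul_le_mul_right 10 this
        _ = 10 ^ ((pvDigitsRec (n / 10)).length + 1) := by ring

lemma pvDigitsRec_lower (n : Nat) (h : 1 ≤ n) : 10 ^ ((pvDigitsRec n).length - 1) ≤ n := by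
  induction n using Nat.strong_induction_on with
  | _ n ih =>
    rw [pvDigitsRec]
    by_cases h10 : n < 10
    · rw [dif_pos h10]; simpa using h
    · simp only [h10, dif_neg, not_false_iff, List.length_append, List.length_singleton]
      have hq1 : 1 ≤ n / 10 := by omega
      have h1 := ih (n / 10) (Nat.div_lt_self (by omega) (by omega)) hq1
      have hlp := pvDigitsRec_length_pos (n / 10)
      calc 10 ^ ((pvDigitsRec (n / 10)).length + 1 - 1)
          = 10 ^ ((pvDigitsRec (n / 10)).length - 1) * 10 := by
            rw [← pow_succ]; congr 1; omega
        _ ≤ (n / 10) * 10 := Nat.mul_le_mul_right 10 h1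
        _ ≤ n := by omega

lemma pvDigitsRec_length_unique (n k : Nat) (hlo : 10 ^ k ≤ n) (hhi : n < 10 ^ (k + 1)) :
    (pvDigitsRec n).length = k + 1 := by
  have h1 : 1 ≤ n := le_trans (Nat.one_le_pow _ _ (by omega)) hlo
  have hu := pvDigitsRec_upper n
  have hl := pvDigitsRec_lower n h1
  have hp := pvDigitsRec_length_pos n
  have hlt1 : 10 ^ ((pvDigitsRec n).length - 1) < 10 ^ (k + 1) := lt_of_le_of_lt hl hhi
  have hlt2 : 10 ^ k < 10 ^ (pvDigitsRec n).length := lt_of_le_of_lt hlo hu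
  have e1 : (pvDigitsRec n).length - 1 < k + 1 := (Nat.pow_lt_pow_iff_right (by omega)).mp hlt1
  have e2 : k < (pvDigitsRec n).length := (Nat.pow_lt_pow_iff_right (by omega)).mp hlt2
  omega

lemma pvPyRepeat_zero (cs : List Char) : PySem.List.pyRepeat cs 0 = [] := by
  simp [PySem.List.pyRepeat]

lemma pvPyRepeat_succ (cs : List Char) (r : Int) (hr : 0 ≤ r) :
    PySem.List.pyRepeat cs (r + 1) = PySem.List.pyRepeat cs r ++ cs := by
  simp only [PySem.List.pyRepeat]
  have : (r + 1).toNat = r.toNat + 1 := by omega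
  rw [this, List.replicate_succ', List.flatten_append]
  simp

lemma pvInner_eq (end_ : Int) (cs : List Char) (b p : Int)
    (hb : b = (pvVal cs : Int)) (hp : p = (10 : Int) ^ cs.length) :
    ∀ (fuel : Nat) (r : Int), 0 ≤ r → ∀ (n : Int),
      n = (pvVal (PySem.List.pyRepeat cs r) : Int) → ∀ (acc : PySem.Set Int),
      pvInnerA end_ cs r acc fuel = pvInnerB end_ b p n acc fuel := by
  intro fuel
  induction fuel with
  | zero => intro r _ n _ acc; rfl
  | succ fuel ih =>
    intro r hr n hn acc
    simp only [pvInnerA, pvInnerB, pvIntOfDigits_eq, ← hn]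
    by_cases hc : n ≤ end_
    · simp only [hc, if_pos]
      apply ih (r + 1) (by omega)
      · rw [pvPyRepeat_succ cs r hr, pvVal_append, hn, hb, hp]
        push_cast
        ring
    · simp [hc]

lemma pvOuter_eq (end_ : Int) : ∀ (fuel : Nat) (i p : Int), 1 ≤ i →
    p = (10 : Int) ^ (pvDigitsRec i.toNat).length → ∀ (acc : PySem.Set Int),
    pvOuterA end_ i acc fuel = pvOuterB end_ i p acc fuel := by
  intro fuel
  induction fuel with
  | zero => intro i p _ _ acc; rfl
  | succ fuel ih =>
    intro i p hi hp acc
    have h0 : (0 : Int) ≤ i := by omega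
    have hiv : ((i.toNat : Nat) : Int) = i := Int.toNat_of_nonneg h0
    have hcs : PySem.Int.toChars i = pvDigitsRec i.toNat := pvToChars_eq i h0
    have hval : (pvVal (PySem.Int.toChars i) : Int) = i := by
      rw [hcs, pvVal_digitsRec, hiv]
    have hcond : pvIntOfDigits (PySem.Int.toChars i ++ PySem.Int.toChars i) = i * p + i := by
      rw [pvIntOfDigits_eq, pvVal_append]
      push_cast
      rw [hval, hp, hcs]
    simp only [pvOuterA, pvOuterB, hcond]
    by_cases hc : i * p + i ≤ end_
    · simp only [hc, if_pos]
      have hinner : pvInnerA end_ (PySem.Int.toChars i) 2 acc (end_.toNat + 2) =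
          pvInnerB end_ i p (i * p + i) acc (end_.toNat + 2) := by
        apply pvInner_eq end_ (PySem.Int.toChars i) i p hval.symm (by rw [hcs, hp])
          (end_.toNat + 2) 2 (by omega) (i * p + i) _ acc
        have h2 : PySem.List.pyRepeat (PySem.Int.toChars i) 2 =
            PySem.Int.toChars i ++ PySem.Int.toChars i := by
          have e1 := pvPyRepeat_succ (PySem.Int.toChars i) 0 (by omega)
          have e2 := pvPyRepeat_succ (PySem.Int.toChars i) 1 (by omega)
          rw [pvPyRepeat_zero] at e1
          norm_num at e1 e2
          rw [e2, e1]
        rw [h2, ← pvIntOfDigits_eq, hcond]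
      rw [hinner]
      -- maintain the invariant that p is the power of ten just above b, across b := b + 1
      set L := (pvDigitsRec i.toNat).length with hL
      have hlp : 0 < L := pvDigitsRec_length_pos i.toNat
      have hup : i.toNat < 10 ^ L := pvDigitsRec_upper i.toNat
      have hlo : 10 ^ (L - 1) ≤ i.toNat := pvDigitsRec_lower i.toNat (by omega)
      have hi1 : (i + 1).toNat = i.toNat + 1 := by omega
      by_cases he : i + 1 = p
      · have hbe : (i + 1 == p) = true := by simpa using he
        rw [hbe]
        simp only [if_pos]
        apply ih (i + 1) (p * 10) (by omega)
        · have hnat : (i + 1).toNat = 10 ^ L := by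
            have : ((i + 1).toNat : Int) = (10 : Int) ^ L := by
              rw [Int.toNat_of_nonneg (by omega), he, hp]
            have : ((i + 1).toNat : Int) = ((10 ^ L : Nat) : Int) := by push_cast; omega
            exact_mod_cast this
          have : (pvDigitsRec (i + 1).toNat).length = L + 1 := by
            apply pvDigitsRec_length_unique _ L (by omega)
            rw [hnat]
            exact Nat.pow_lt_pow_right (by omega) (by omega)
          rw [this, hp]
          ring
      · have hbe : (i + 1 == p) = false := by simpa using he
        rw [hbe]
        simp only [if_neg, Bool.false_eq_true, not_false_iff]
        apply ih (i + 1) p (by omega)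
        · have hlt : (i + 1).toNat < 10 ^ L := by
            have hle : i + 1 ≤ p := by
              have : (i.toNat : Int) < ((10 ^ L : Nat) : Int) := by exact_mod_cast hup
              push_cast at this
              omega
            have hne2 : i + 1 ≠ p := he
            have : i + 1 < p := lt_of_le_of_ne hle hne2
            have : ((i + 1).toNat : Int) < ((10 ^ L : Nat) : Int) := by
              rw [Int.toNat_of_nonneg (by omega)]
              push_cast
              rw [hp] at this
              exact_mod_cast this
            exact_mod_cast this
          have : (pvDigitsRec (i + 1).toNat).length = (L - 1) + 1 := by
            apply pvDigitsRec_length_unique _ (L - 1) (by omega)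
            have : L - 1 + 1 = L := by omega
            rw [this]
            exact hlt
          rw [this, hp]
          congr 1
          omega
    · simp [hc]

-- ===== VERDICT (by name: the statement is the Claim_ definition above) =====
theorem generate_invalid_v2_spec : Claim_equal_generate_invalid_v2 := by
  intro end_ _
  unfold Spec_generate_invalid_v2 generate_invalid_v2 generate_invalid_v2_alt
  exact pvOuter_eq end_ (end_.toNat + 2) 1 10 (by omega) (by rw [show (1:Int).toNat = 1 from rfl, pvDigitsRec]; norm_num) PySem.Set.empty
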